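-- pv_equiv track=rewrite | github.com/ritvikm57/AI-CS2201 | Assignment-4/crypto-csp.py | get_constraint_status
-- ===== SOURCE A (Python) =====
-- def get_constraint_status(name, assignment):
--     if name == 'col1':
--         if all(v in assignment for v in ['O', 'R', 'C1']):
--             lhs = assignment['O'] * 2
--             rhs = assignment['R'] + 10 * assignment['C1']
--             return lhs == rhs, f"O+O = {lhs}  vs  R+10·C1 = {rhs}"
--         return None, 'O + O = R + 10·C1'
--     elif name == 'col2':
--         if all(v in assignment for v in ['C1', 'W', 'U', 'C2']):
--             lhs = assignment['C1'] + assignment['W'] * 2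
--             rhs = assignment['U'] + 10 * assignment['C2']
--             return lhs == rhs, f"C1+W+W = {lhs}  vs  U+10·C2 = {rhs}"
--         return None, 'C1 + W + W = U + 10·C2'
--     elif name == 'col3':
--         if all(v in assignment for v in ['C2', 'T', 'O', 'C3']):
--             lhs = assignment['C2'] + assignment['T'] * 2
--             rhs = assignment['O'] + 10 * assignment['C3']
--             return lhs == rhs, f"C2+T+T = {lhs}  vs  O+10·C3 = {rhs}"
--         return None, 'C2 + T + T = O + 10·C3'
--     elif name == 'c3f':
--         if 'C3' in assignment and 'F' in assignment:
--             ok = assignment['C3'] == assignment['F']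
--             return ok, f"C3={assignment['C3']}  vs  F={assignment['F']}"
--         return None, 'C3 = F'
--     return None, '—'
-- ===== SOURCE B (Python) =====
-- # B: interpret the constraint from its human-readable equation text instead of
-- # per-case arithmetic: each column constraint is stored once as the string
-- # 'O + O = R + 10·C1'; the body parses it (split on ' = ' and ' + ', a term
-- # '10·X' meaning ten times X), evaluates each side over the assignment and
-- # rebuilds the success labels by joining the terms with '+'.
-- EQNS = {
--     'col1': 'O + O = R + 10·C1',
--     'col2': 'C1 + W + W = U + 10·C2',
--     'col3': 'C2 + T + T = O + 10·C3',
-- }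
--
--
-- def _value(terms, assignment):
--     total = 0
--     for t in terms:
--         coeff, var = (10, t[3:]) if t.startswith('10·') else (1, t)
--         if var not in assignment:
--             return None
--         total += coeff * assignment[var]
--     return total
--
--
-- def get_constraint_status(name, assignment):
--     eqn = EQNS.get(name)
--     if eqn is not None:
--         left, right = eqn.split(' = ')
--         lterms, rterms = left.split(' + '), right.split(' + ')
--         lhs, rhs = _value(lterms, assignment), _value(rterms, assignment)
--         if lhs is None or rhs is None:
--             return None, eqn
--         return lhs == rhs, f"{'+'.join(lterms)} = {lhs}  vs  {'+'.join(rterms)} = {rhs}"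
--     if name == 'c3f':
--         if 'C3' in assignment and 'F' in assignment:
--             c3, f = assignment['C3'], assignment['F']
--             return c3 == f, f"C3={c3}  vs  F={f}"
--         return None, 'C3 = F'
--     return None, '—'
-- ===== Notes on version B (the rewrite author's own statement) =====
-- stated objective: alternative
-- what changed: B stores each column constraint once as its human-readable equation text ('O + O = R + 10·C1'), parses it (split on ' = ' and ' + ', a '10·X' term meaning ten times X) and evaluates both sides generically over the assignment, rebuilding the success labels by joining the parsed terms, instead of A's three copy-pasted per-case arithmetic branches; c3f and the default stay minimal special cases.
import Mathlib
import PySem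

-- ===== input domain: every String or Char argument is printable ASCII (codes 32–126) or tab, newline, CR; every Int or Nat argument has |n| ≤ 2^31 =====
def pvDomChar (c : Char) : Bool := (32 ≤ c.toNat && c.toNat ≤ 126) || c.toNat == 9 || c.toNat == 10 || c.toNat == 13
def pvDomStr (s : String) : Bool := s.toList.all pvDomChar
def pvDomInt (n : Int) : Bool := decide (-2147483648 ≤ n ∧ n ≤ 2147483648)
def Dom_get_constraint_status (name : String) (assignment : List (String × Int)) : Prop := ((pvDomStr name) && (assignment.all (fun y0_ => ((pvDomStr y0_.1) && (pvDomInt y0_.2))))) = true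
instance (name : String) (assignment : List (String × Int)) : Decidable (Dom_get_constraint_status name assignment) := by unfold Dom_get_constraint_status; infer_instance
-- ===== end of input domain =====

-- B stores each column constraint once as its equation text and evaluates both
-- sides by parsing that text, instead of A's three copy-pasted arithmetic
-- branches; same values on every input (alternative decomposition, same cost).

-- ===== PORT A =====
-- `v in assignment` on the dict (assoc list, first match wins)
def pyInA (assignment : List (String × Int)) (v : String) : Bool :=
  assignment.any (fun p => p.1 == v)

-- `assignment[v]`; only used under the pyInA guard, so the none default is unreachable
def pyAtA (assignment : List (String × Int)) (v : String) : Int :=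
  match assignment.find? (fun p => p.1 == v) with
  | some p => p.2
  | none => 0

def get_constraint_status (name : String) (assignment : List (String × Int)) : Option Bool × String :=
  if name == "col1" then
    if ["O", "R", "C1"].all (fun v => pyInA assignment v) then
      let lhs := pyAtA assignment "O" * 2
      let rhs := pyAtA assignment "R" + 10 * pyAtA assignment "C1"
      (some (lhs == rhs), "O+O = " ++ PySem.Int.toStr lhs ++ "  vs  R+10·C1 = " ++ PySem.Int.toStr rhs)
    else (none, "O + O = R + 10·C1")
  else if name == "col2" then
    if ["C1", "W", "U", "C2"].all (fun v => pyInA assignment v) then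
      let lhs := pyAtA assignment "C1" + pyAtA assignment "W" * 2
      let rhs := pyAtA assignment "U" + 10 * pyAtA assignment "C2"
      (some (lhs == rhs), "C1+W+W = " ++ PySem.Int.toStr lhs ++ "  vs  U+10·C2 = " ++ PySem.Int.toStr rhs)
    else (none, "C1 + W + W = U + 10·C2")
  else if name == "col3" then
    if ["C2", "T", "O", "C3"].all (fun v => pyInA assignment v) then
      let lhs := pyAtA assignment "C2" + pyAtA assignment "T" * 2
      let rhs := pyAtA assignment "O" + 10 * pyAtA assignment "C3"
      (some (lhs == rhs), "C2+T+T = " ++ PySem.Int.toStr lhs ++ "  vs  O+10·C3 = " ++ PySem.Int.toStr rhs)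
    else (none, "C2 + T + T = O + 10·C3")
  else if name == "c3f" then
    if pyInA assignment "C3" && pyInA assignment "F" then
      let ok := pyAtA assignment "C3" == pyAtA assignment "F"
      (some ok, "C3=" ++ PySem.Int.toStr (pyAtA assignment "C3") ++ "  vs  F=" ++ PySem.Int.toStr (pyAtA assignment "F"))
    else (none, "C3 = F")
  else (none, "—")

-- ===== PORT B =====
def EQNS : List (String × String) :=
  [("col1", "O + O = R + 10·C1"),
   ("col2", "C1 + W + W = U + 10·C2"),
   ("col3", "C2 + T + T = O + 10·C3")]

-- _value(terms, assignment): fold over the parsed terms with a running total;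
-- a term '10·X' contributes 10*assignment[X], any unbound variable yields None
def pvValue (terms : List String) (assignment : List (String × Int)) (total : Int) : Option Int :=
  match terms with
  | [] => some total
  | t :: ts =>
    let cv := if PySem.Str.startswith t "10·" then ((10 : Int), PySem.Str.slice t (some 3) none)
              else ((1 : Int), t)
    match List.lookup cv.2 assignment with
    | none => none
    | some v => pvValue ts assignment (total + cv.1 * v)

def get_constraint_status_alt (name : String) (assignment : List (String × Int)) : Option Bool × String :=
  match List.lookup name EQNS with
  | some eqn =>
    -- left, right = eqn.split(' = ')  (every EQNS value has exactly one ' = ')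
    let parts := (PySem.Str.split? eqn " = ").getD []
    let left := parts.headD ""
    let right := (parts.drop 1).headD ""
    let lterms := (PySem.Str.split? left " + ").getD []
    let rterms := (PySem.Str.split? right " + ").getD []
    match pvValue lterms assignment 0, pvValue rterms assignment 0 with
    | some lhs, some rhs =>
      (some (lhs == rhs),
        PySem.Str.join "+" lterms ++ " = " ++ PySem.Int.toStr lhs ++ "  vs  " ++
        PySem.Str.join "+" rterms ++ " = " ++ PySem.Int.toStr rhs)
    | _, _ => (none, eqn)
  | none =>
    if name == "c3f" then
      if ((List.lookup "C3" assignment).isSome && (List.lookup "F" assignment).isSome) then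
        let c3 := (List.lookup "C3" assignment).getD 0
        let f := (List.lookup "F" assignment).getD 0
        (some (c3 == f), "C3=" ++ PySem.Int.toStr c3 ++ "  vs  F=" ++ PySem.Int.toStr f)
      else (none, "C3 = F")
    else (none, "—")

-- ===== PRECONDITION & SPEC =====
def Spec_get_constraint_status (name : String) (assignment : List (String × Int)) (out : Option Bool × String) : Prop := out = get_constraint_status_alt name assignment
instance (name : String) (assignment : List (String × Int)) (out : Option Bool × String) : Decidable (Spec_get_constraint_status name assignment out) := by unfold Spec_get_constraint_status; infer_instance

-- ===== CLAIM =====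
def Claim_equal_get_constraint_status : Prop := ∀ (name : String) (assignment : List (String × Int)), Dom_get_constraint_status name assignment → Spec_get_constraint_status name assignment (get_constraint_status name assignment)

-- ===== LEMMAS AND PROOFS =====
theorem lookup_eq_find (k : String) (xs : List (String × Int)) :
    List.lookup k xs = (xs.find? (fun p => p.1 == k)).map (·.2) := by
  induction xs with
  | nil => rfl
  | cons x xs ih =>
    obtain ⟨a, b⟩ := x
    by_cases h : a = k
    · simp [List.lookup, h]
    · have hk : (k == a) = false := by simp [Ne.symm h]
      simp [List.lookup, hk, h, ih]

theorem pyAtA_eq (assignment : List (String × Int)) (v : String) :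
    pyAtA assignment v = (List.lookup v assignment).getD 0 := by
  rw [lookup_eq_find]
  unfold pyAtA
  cases assignment.find? (fun p => p.1 == v) <;> simp

theorem pyInA_eq (assignment : List (String × Int)) (v : String) :
    pyInA assignment v = (List.lookup v assignment).isSome := by
  induction assignment with
  | nil => rfl
  | cons x xs ih =>
    obtain ⟨a, b⟩ := x
    by_cases h : a = v
    · simp [pyInA, List.lookup, h]
    · have hk : (v == a) = false := by simp [Ne.symm h]
      have ha : (a == v) = false := by simp [h]
      simp only [pyInA, List.any_cons, List.lookup, hk, ha, Bool.false_or]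
      exact ih

-- ===== VERDICT =====
theorem get_constraint_status_spec : Claim_equal_get_constraint_status := by
  unfold Claim_equal_get_constraint_status
  intro name assignment _
  unfold Spec_get_constraint_status get_constraint_status get_constraint_status_alt
  by_cases h1 : name = "col1"
  · subst h1
    have e : List.lookup "col1" EQNS = some "O + O = R + 10·C1" := by decide
    have hL : (PySem.Str.split? "O + O = R + 10·C1" " = ").getD [] = ["O + O", "R + 10·C1"] := by decide
    have hl : (PySem.Str.split? "O + O" " + ").getD [] = ["O", "O"] := by decide
    have hr : (PySem.Str.split? "R + 10·C1" " + ").getD [] = ["R", "10·C1"] := by decide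
    have s1 : PySem.Chars.startswith ['O'] ['1', '0', '·'] = false := by decide
    have s2 : PySem.Chars.startswith ['R'] ['1', '0', '·'] = false := by decide
    have s3 : PySem.Chars.startswith ['1', '0', '·', 'C', '1'] ['1', '0', '·'] = true := by decide
    have sl : PySem.Str.slice "10·C1" (some 3) none = "C1" := by decide
    have j1 : PySem.Str.join "+" ["O", "O"] = "O+O" := by decide
    have j2 : PySem.Str.join "+" ["R", "10·C1"] = "R+10·C1" := by decide
    rw [e]
    simp only [beq_self_eq_true, reduceIte, hL, List.headD, List.drop, hl, hr,
      pyInA_eq, pyAtA_eq, List.all_cons, List.all_nil]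
    cases hO : List.lookup "O" assignment <;> cases hR : List.lookup "R" assignment <;>
      cases hC1 : List.lookup "C1" assignment <;>
      simp [pvValue, s1, s2, s3, sl, j1, j2, hO, hR, hC1, mul_two, String.append_assoc]
  · have e1 : (name == "col1") = false := by simp [h1]
    by_cases h2 : name = "col2"
    · subst h2
      have e : List.lookup "col2" EQNS = some "C1 + W + W = U + 10·C2" := by decide
      have hL : (PySem.Str.split? "C1 + W + W = U + 10·C2" " = ").getD [] = ["C1 + W + W", "U + 10·C2"] := by decide
      have hl : (PySem.Str.split? "C1 + W + W" " + ").getD [] = ["C1", "W", "W"] := by decide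
      have hr : (PySem.Str.split? "U + 10·C2" " + ").getD [] = ["U", "10·C2"] := by decide
      have s1 : PySem.Chars.startswith ['C', '1'] ['1', '0', '·'] = false := by decide
      have s2 : PySem.Chars.startswith ['W'] ['1', '0', '·'] = false := by decide
      have s3 : PySem.Chars.startswith ['U'] ['1', '0', '·'] = false := by decide
      have s4 : PySem.Chars.startswith ['1', '0', '·', 'C', '2'] ['1', '0', '·'] = true := by decide
      have sl : PySem.Str.slice "10·C2" (some 3) none = "C2" := by decide
      have j1 : PySem.Str.join "+" ["C1", "W", "W"] = "C1+W+W" := by decide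
      have j2 : PySem.Str.join "+" ["U", "10·C2"] = "U+10·C2" := by decide
      rw [e]
      simp only [beq_self_eq_true, reduceIte, e1, Bool.false_eq_true, if_false, hL,
        List.headD, List.drop, hl, hr, pyInA_eq, pyAtA_eq, List.all_cons, List.all_nil]
      cases hC1 : List.lookup "C1" assignment <;> cases hW : List.lookup "W" assignment <;>
        cases hU : List.lookup "U" assignment <;> cases hC2 : List.lookup "C2" assignment <;>
        simp [pvValue, s1, s2, s3, s4, sl, j1, j2, hC1, hW, hU, hC2, mul_two,
          String.append_assoc, add_assoc]
    · have e2 : (name == "col2") = false := by simp [h2]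
      by_cases h3 : name = "col3"
      · subst h3
        have e : List.lookup "col3" EQNS = some "C2 + T + T = O + 10·C3" := by decide
        have hL : (PySem.Str.split? "C2 + T + T = O + 10·C3" " = ").getD [] = ["C2 + T + T", "O + 10·C3"] := by decide
        have hl : (PySem.Str.split? "C2 + T + T" " + ").getD [] = ["C2", "T", "T"] := by decide
        have hr : (PySem.Str.split? "O + 10·C3" " + ").getD [] = ["O", "10·C3"] := by decide
        have s1 : PySem.Chars.startswith ['C', '2'] ['1', '0', '·'] = false := by decide
        have s2 : PySem.Chars.startswith ['T'] ['1', '0', '·'] = false := by decide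
        have s3 : PySem.Chars.startswith ['O'] ['1', '0', '·'] = false := by decide
        have s4 : PySem.Chars.startswith ['1', '0', '·', 'C', '3'] ['1', '0', '·'] = true := by decide
        have sl : PySem.Str.slice "10·C3" (some 3) none = "C3" := by decide
        have j1 : PySem.Str.join "+" ["C2", "T", "T"] = "C2+T+T" := by decide
        have j2 : PySem.Str.join "+" ["O", "10·C3"] = "O+10·C3" := by decide
        rw [e]
        simp only [beq_self_eq_true, reduceIte, e1, e2, Bool.false_eq_true, if_false, hL,
          List.headD, List.drop, hl, hr, pyInA_eq, pyAtA_eq, List.all_cons, List.all_nil]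
        cases hC2 : List.lookup "C2" assignment <;> cases hT : List.lookup "T" assignment <;>
          cases hO : List.lookup "O" assignment <;> cases hC3 : List.lookup "C3" assignment <;>
          simp [pvValue, s1, s2, s3, s4, sl, j1, j2, hC2, hT, hO, hC3, mul_two,
            String.append_assoc, add_assoc]
      · have e3 : (name == "col3") = false := by simp [h3]
        have hs : List.lookup name EQNS = none := by
          simp [EQNS, List.lookup, e1, e2, e3]
        rw [hs]
        by_cases h4 : name = "c3f"
        · subst h4
          simp only [pyInA_eq, pyAtA_eq, beq_self_eq_true, e1, e2, e3, reduceIte]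
          cases hC3 : List.lookup "C3" assignment <;> cases hF : List.lookup "F" assignment <;> simp
        · have e4 : (name == "c3f") = false := by simp [h4]
          simp [e1, e2, e3, e4]
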